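-- pv_equiv track=rewrite | github.com/Chesedd/LightConductor | src/lightconductor/application/patterns.py | apply_fill_range
-- ===== SOURCE A (Python) =====
-- from typing import List
--
-- def apply_fill_range(colors: List[List[int]], start: int, end: int, rgb: List[int]) -> List[List[int]]:
--     """Fill inclusive LED range [start, end] with rgb and return updated colors copy."""
--     updated = [list(color) for color in colors]
--     if not updated:
--         return updated
--
--     left = max(0, min(start, end))
--     right = min(len(updated) - 1, max(start, end))
--     for i in range(left, right + 1):
--         updated[i] = [rgb[0], rgb[1], rgb[2]]
--     return updated
-- ===== SOURCE B (Python) =====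
-- def apply_fill_range(colors, start, end, rgb):
--     """Fill inclusive LED range [start, end] with rgb and return updated colors copy."""
--     left = max(0, min(start, end))
--     right = min(len(colors) - 1, max(start, end))
--     if right < left:
--         return [list(c) for c in colors]
--     fill = [rgb[0], rgb[1], rgb[2]]
--     return ([list(c) for c in colors[:left]]
--             + [fill[:] for _ in range(right - left + 1)]
--             + [list(c) for c in colors[right + 1:]])
-- ===== Notes on version B (the rewrite author's own statement) =====
-- stated objective: alternative
-- what changed: B builds the result by slicing and concatenation -- colors[:left] + (right-left+1) copies of the fill triple + colors[right+1:] -- instead of A's deep copy followed by index-assignment of the range in a loop.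
import Mathlib
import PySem

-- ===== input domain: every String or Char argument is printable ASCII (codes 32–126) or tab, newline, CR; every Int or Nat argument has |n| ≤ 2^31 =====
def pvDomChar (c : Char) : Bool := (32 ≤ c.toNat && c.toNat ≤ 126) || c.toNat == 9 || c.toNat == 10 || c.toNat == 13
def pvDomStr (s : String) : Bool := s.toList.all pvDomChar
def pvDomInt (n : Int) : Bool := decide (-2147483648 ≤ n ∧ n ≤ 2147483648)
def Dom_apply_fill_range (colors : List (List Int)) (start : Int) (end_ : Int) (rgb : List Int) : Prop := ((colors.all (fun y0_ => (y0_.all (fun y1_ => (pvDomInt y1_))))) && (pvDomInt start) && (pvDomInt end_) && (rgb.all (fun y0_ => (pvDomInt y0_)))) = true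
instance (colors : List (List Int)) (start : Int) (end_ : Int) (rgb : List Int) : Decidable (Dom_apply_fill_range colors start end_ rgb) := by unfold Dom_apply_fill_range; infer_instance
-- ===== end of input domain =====

-- B builds the result by slice concatenation (prefix copy + replicated fill + suffix copy)
-- instead of A's deep copy followed by an index-assignment loop; objective: alternative.


-- ===== PORT A =====
def apply_fill_range (colors : List (List Int)) (start : Int) (end_ : Int) (rgb : List Int) : List (List Int) :=
  let updated := colors.map (fun color => color.map (fun x => x))
  if updated = [] then updated
  else
    let left := max 0 (min start end_)
    let right := min ((updated.length : Int) - 1) (max start end_)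
    (PySem.List.pyRange left (right + 1) 1).foldl
      (fun acc i => acc.set i.toNat
        [PySem.List.pyGetD rgb 0 0, PySem.List.pyGetD rgb 1 0, PySem.List.pyGetD rgb 2 0])
      updated

-- ===== PORT B =====
def apply_fill_range_alt (colors : List (List Int)) (start : Int) (end_ : Int) (rgb : List Int) : List (List Int) :=
  let left := max 0 (min start end_)
  let right := min ((colors.length : Int) - 1) (max start end_)
  if right < left then colors.map (fun c => c.map (fun x => x))
  else
    let fill := [PySem.List.pyGetD rgb 0 0, PySem.List.pyGetD rgb 1 0, PySem.List.pyGetD rgb 2 0]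
    (PySem.List.slice colors none (some left)).map (fun c => c.map (fun x => x))
      ++ (PySem.List.pyRange 0 (right - left + 1) 1).map (fun _ => PySem.List.slice fill none none)
      ++ (PySem.List.slice colors (some (right + 1)) none).map (fun c => c.map (fun x => x))

-- ===== PRECONDITION & SPEC =====
-- Pre_ excludes exactly the inputs on which the Python A raises IndexError:
-- a nonempty fill range ([left,right] nonempty) with fewer than 3 components in rgb.
def Pre_apply_fill_range (colors : List (List Int)) (start : Int) (end_ : Int) (rgb : List Int) : Prop :=
  max 0 (min start end_) ≤ min ((colors.length : Int) - 1) (max start end_) → 3 ≤ rgb.length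
instance (colors : List (List Int)) (start : Int) (end_ : Int) (rgb : List Int) : Decidable (Pre_apply_fill_range colors start end_ rgb) := by unfold Pre_apply_fill_range; infer_instance

def pvWitness_apply_fill_range : List (List Int) × Int × Int × List Int :=
  ([[1, 2, 3], [4, 5, 6]], 0, 1, [7, 8, 9])

def Spec_apply_fill_range (colors : List (List Int)) (start : Int) (end_ : Int) (rgb : List Int) (out : List (List Int)) : Prop := out = apply_fill_range_alt colors start end_ rgb
instance (colors : List (List Int)) (start : Int) (end_ : Int) (rgb : List Int) (out : List (List Int)) : Decidable (Spec_apply_fill_range colors start end_ rgb out) := by unfold Spec_apply_fill_range; infer_instance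

-- ===== CLAIM (what is proved, stated in full; the proofs are below) =====
def Claim_equal_apply_fill_range : Prop := ∀ (colors : List (List Int)) (start : Int) (end_ : Int) (rgb : List Int), Dom_apply_fill_range colors start end_ rgb → Pre_apply_fill_range colors start end_ rgb → Spec_apply_fill_range colors start end_ rgb (apply_fill_range colors start end_ rgb)

-- ===== LEMMAS AND PROOFS =====

-- folding `set` over a list of indices: length is preserved
theorem length_foldl_set {α : Type} (l : List Int) (v : α) (acc : List α) :
    (l.foldl (fun a i => a.set i.toNat v) acc).length = acc.length := by
  induction l generalizing acc with
  | nil => rfl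
  | cons i tl ih => simp [List.foldl, ih]

-- folding `set` over a list of nonnegative indices, read back at index k
theorem foldl_set_getElem {α : Type} (l : List Int) (hl : ∀ i ∈ l, 0 ≤ i) (v : α)
    (acc : List α) (k : Nat) (hk : k < acc.length) :
    (l.foldl (fun a i => a.set i.toNat v) acc)[k]'(by rw [length_foldl_set]; exact hk) =
      if (k : Int) ∈ l then v else acc[k] := by
  induction l generalizing acc with
  | nil => simp
  | cons i tl ih =>
    have hi : 0 ≤ i := hl i (by simp)
    have htl : ∀ j ∈ tl, 0 ≤ j := fun j hj => hl j (by simp [hj])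
    simp only [List.foldl]
    rw [ih htl (acc.set i.toNat v) (by simpa using hk)]
    by_cases hmem : (k : Int) ∈ tl
    · simp [hmem]
    · simp only [hmem, if_false, List.mem_cons]
      by_cases hki : (k : Int) = i
      · have : i.toNat = k := by omega
        simp [hki, this]
      · have : i.toNat ≠ k := by omega
        simp [hki, this]

-- ===== VERDICT (by name: the statement is the Claim_ definition above) =====
theorem apply_fill_range_spec : Claim_equal_apply_fill_range := by
  intro colors start end_ rgb _ _
  unfold Spec_apply_fill_range apply_fill_range apply_fill_range_alt
  simp only [List.map_id']
  set v : List Int :=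
    [PySem.List.pyGetD rgb 0 0, PySem.List.pyGetD rgb 1 0, PySem.List.pyGetD rgb 2 0] with hv
  set left : Int := max 0 (min start end_) with hleft
  set right : Int := min ((colors.length : Int) - 1) (max start end_) with hright
  have hL : 0 ≤ left := le_max_left 0 _
  by_cases hrl : right < left
  · -- empty range: A's loop body never runs, B takes the copy branch
    rw [if_pos hrl]
    by_cases hnil : colors = []
    · simp [hnil]
    · rw [if_neg hnil, PySem.List.pyRange_one_eq_nil (by omega)]
      rfl
  · -- nonempty range: colors is nonempty, both equal prefix ++ fill block ++ suffix
    have hR : right ≤ (colors.length : Int) - 1 := min_le_left _ _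
    have hlen : 1 ≤ colors.length := by omega
    have hnil : colors ≠ [] := by
      intro h; rw [h] at hlen; simp at hlen
    rw [if_neg hrl, if_neg hnil]
    rw [PySem.List.slice_to colors hL,
        PySem.List.slice_from colors (by omega : (0:Int) ≤ right + 1),
        PySem.List.slice_none_none v]
    apply List.ext_getElem
    · rw [length_foldl_set]
      simp [PySem.List.length_pyRange_one]
      omega
    · intro k hk₁ hk₂
      have hkc : k < colors.length := by rw [length_foldl_set] at hk₁; exact hk₁
      have hpos : ∀ i ∈ PySem.List.pyRange left (right + 1) 1, 0 ≤ i := by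
        intro i hi
        rw [PySem.List.mem_pyRange_one] at hi
        omega
      rw [foldl_set_getElem _ hpos v colors k hkc]
      have hiff := PySem.List.mem_pyRange_one (x := (k : Int)) (a := left) (b := right + 1)
      have hlt : left.toNat ≤ colors.length := by omega
      have hmid : (PySem.List.pyRange 0 (right - left + 1) 1).length = (right - left + 1).toNat := by
        rw [PySem.List.length_pyRange_one]; congr 1; omega
      have hmin : min left.toNat colors.length = left.toNat := by omega
      simp only [List.getElem_append, List.length_append, List.length_take, List.length_map,
        hmid, hmin]
      split_ifs with h1 h2 h3 h4 h5
      · -- in range but in the prefix position: impossible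
        exfalso; have := hiff.mp h1; omega
      · -- in range, fill-block position: both sides are v
        rw [List.getElem_map]
      · -- in range but in the suffix position: impossible
        exfalso; have := hiff.mp h1; omega
      · -- out of range, prefix position
        rw [List.getElem_take]
      · -- out of range but fill-block position: impossible
        exfalso; exact h1 (hiff.mpr ⟨by omega, by omega⟩)
      · -- out of range, suffix position
        rw [List.getElem_drop]
        congr 1
        omega
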